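-- pv_equiv track=rewrite | github.com/deborahferguson/advent_of_code | dec7_2.py | next_free_workers
-- ===== SOURCE A (Python) =====
-- def next_free_workers(workers):
--     steps = []
--     shortest_times = len(workers[0])
--     free_workers = []
--     for i,val in enumerate(workers):
--         if(len(val)<shortest_times):
--             shortest_times = len(val)
--     for i,val in enumerate(workers):
--         if(len(val)==shortest_times):
--             free_workers.append(i)
--             if(len(val)>0):
--                 steps.append(val[-1])
--     return free_workers, steps
-- ===== SOURCE B (Python) =====
-- def next_free_workers(workers):
--     # Single pass with a running minimum: reset the buckets whenever a
--     # strictly shorter worker list appears, append on ties.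
--     best = len(workers[0])
--     free_workers = []
--     steps = []
--     for i, val in enumerate(workers):
--         L = len(val)
--         if L < best:
--             best = L
--             free_workers = []
--             steps = []
--         if L == best:
--             free_workers.append(i)
--             if L > 0:
--                 steps.append(val[-1])
--     return free_workers, steps
-- ===== Notes on version B (the rewrite author's own statement) =====
-- stated objective: alternative
-- what changed: B replaces A's two passes (first find the minimum length, then rescan to collect matching indices/last steps) by a single pass that keeps a running minimum and resets its accumulated index/step buckets whenever a strictly shorter worker appears.
import Mathlib
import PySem

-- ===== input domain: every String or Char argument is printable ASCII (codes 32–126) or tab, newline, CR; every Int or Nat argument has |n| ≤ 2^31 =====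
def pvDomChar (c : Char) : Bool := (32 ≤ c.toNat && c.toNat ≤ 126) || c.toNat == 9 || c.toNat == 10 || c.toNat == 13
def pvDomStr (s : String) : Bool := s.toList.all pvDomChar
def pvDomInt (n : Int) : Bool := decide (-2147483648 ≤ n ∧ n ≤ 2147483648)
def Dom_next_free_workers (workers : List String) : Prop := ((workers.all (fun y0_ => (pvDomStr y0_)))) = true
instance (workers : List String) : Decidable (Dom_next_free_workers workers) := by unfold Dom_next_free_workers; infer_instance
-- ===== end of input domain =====

-- B folds in ONE pass with a running minimum that resets its accumulators, where A makes
-- two passes (min length first, then collect); same cost, different decomposition.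


-- ===== PORT A =====
-- val[-1] on a nonempty Python str: the last character as a one-char string
def lastStrA (val : String) : String :=
  match PySem.Str.pyGet? val (-1) with
  | some c => String.ofList [c]
  | none => ""

def next_free_workers (workers : List String) : List Int × List String :=
  -- shortest_times = len(workers[0]); A raises IndexError on [], excluded by Pre_
  let shortest0 : Int := PySem.Str.len ((PySem.List.pyGet? workers 0).getD "")
  let shortest : Int :=
    (PySem.List.enumerate workers 0).foldl
      (fun st p => if PySem.Str.len p.2 < st then PySem.Str.len p.2 else st) shortest0
  (PySem.List.enumerate workers 0).foldl
    (fun (st : List Int × List String) p =>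
      if PySem.Str.len p.2 = shortest then
        (st.1 ++ [p.1],
         if PySem.Str.len p.2 > 0 then st.2 ++ [lastStrA p.2] else st.2)
      else st)
    ([], [])

-- ===== PORT B =====
def next_free_workers_alt (workers : List String) : List Int × List String :=
  let best0 : Int := PySem.Str.len ((PySem.List.pyGet? workers 0).getD "")
  let st :=
    (PySem.List.enumerate workers 0).foldl
      (fun (st : Int × List Int × List String) p =>
        let L := PySem.Str.len p.2
        let st := if L < st.1 then (L, ([] : List Int), ([] : List String)) else st
        if L = st.1 then
          (st.1, st.2.1 ++ [p.1],
           if L > 0 then st.2.2 ++ [lastStrA p.2] else st.2.2)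
        else st)
      (best0, [], [])
  (st.2.1, st.2.2)

-- ===== PRECONDITION & SPEC =====
-- Pre_ excludes the empty list, on which A (and B) raise IndexError at workers[0].
def Pre_next_free_workers (workers : List String) : Prop := workers ≠ []
instance (workers : List String) : Decidable (Pre_next_free_workers workers) := by
  unfold Pre_next_free_workers; infer_instance

def pvWitness_next_free_workers : List String := ["ab"]

def Spec_next_free_workers (workers : List String) (out : List Int × List String) : Prop :=
  out = next_free_workers_alt workers
instance (workers : List String) (out : List Int × List String) :
    Decidable (Spec_next_free_workers workers out) := by
  unfold Spec_next_free_workers; infer_instance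

-- ===== CLAIM (what is proved, stated in full; the proofs are below) =====
def Claim_equal_next_free_workers : Prop :=
  ∀ (workers : List String), Dom_next_free_workers workers →
    Pre_next_free_workers workers →
    Spec_next_free_workers workers (next_free_workers workers)

-- ===== LEMMAS AND PROOFS =====

-- running minimum of the string lengths with initial value b
def minF (b : Int) : List String → Int
  | [] => b
  | v :: t => minF (if PySem.Str.len v < b then PySem.Str.len v else b) t

-- the indices (from start index s) of the strings of length m
def selIdx (m : Int) : List String → Int → List Int
  | [], _ => []
  | v :: t, s => (if PySem.Str.len v = m then [s] else []) ++ selIdx m t (s + 1)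

-- the last characters of the nonempty strings of length m
def selSteps (m : Int) : List String → List String
  | [] => []
  | v :: t =>
      (if PySem.Str.len v = m ∧ PySem.Str.len v > 0 then [lastStrA v] else []) ++ selSteps m t

lemma minF_le_init (ws : List String) : ∀ b : Int, minF b ws ≤ b := by
  induction ws with
  | nil => intro b; simp [minF]
  | cons v t ih =>
      intro b
      simp only [minF]
      split_ifs with h
      · exact le_trans (ih _) (le_of_lt h)
      · exact ih _

lemma minFold_eq (ws : List String) : ∀ (s b : Int),
    (PySem.List.enumerate ws s).foldl
      (fun st p => if PySem.Str.len p.2 < st then PySem.Str.len p.2 else st) b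
      = minF b ws := by
  induction ws with
  | nil => intro s b; simp [PySem.List.enumerate_nil, minF]
  | cons v t ih =>
      intro s b
      rw [PySem.List.enumerate_cons, List.foldl_cons]
      rw [minF, ih]

lemma aFold_eq (m : Int) (ws : List String) : ∀ (s : Int) (I : List Int) (S : List String),
    (PySem.List.enumerate ws s).foldl
      (fun (st : List Int × List String) p =>
        if PySem.Str.len p.2 = m then
          (st.1 ++ [p.1],
           if PySem.Str.len p.2 > 0 then st.2 ++ [lastStrA p.2] else st.2)
        else st)
      (I, S)
      = (I ++ selIdx m ws s, S ++ selSteps m ws) := by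
  induction ws with
  | nil => intro s I S; simp [PySem.List.enumerate_nil, selIdx, selSteps]
  | cons v t ih =>
      intro s I S
      rw [PySem.List.enumerate_cons, List.foldl_cons]
      simp only [selIdx, selSteps]
      by_cases hm : PySem.Str.len v = m
      · by_cases hp : PySem.Str.len v > 0
        · rw [if_pos hm, if_pos hp, ih, if_pos hm, if_pos (⟨hm, hp⟩ : _ ∧ _)]
          simp
        · rw [if_pos hm, if_neg hp, ih, if_pos hm, if_neg (fun h => hp h.2)]
          simp
      · rw [if_neg hm, ih, if_neg hm, if_neg (fun h => hm h.1)]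
        simp

lemma bFold_eq (ws : List String) : ∀ (s b : Int) (I : List Int) (S : List String),
    (PySem.List.enumerate ws s).foldl
      (fun (st : Int × List Int × List String) p =>
        let L := PySem.Str.len p.2
        let st := if L < st.1 then (L, ([] : List Int), ([] : List String)) else st
        if L = st.1 then
          (st.1, st.2.1 ++ [p.1],
           if L > 0 then st.2.2 ++ [lastStrA p.2] else st.2.2)
        else st)
      (b, I, S)
      = (minF b ws,
         (if b ≤ minF b ws then I else []) ++ selIdx (minF b ws) ws s,
         (if b ≤ minF b ws then S else []) ++ selSteps (minF b ws) ws) := by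
  induction ws with
  | nil =>
      intro s b I S
      simp [PySem.List.enumerate_nil, minF, selIdx, selSteps]
  | cons v t ih =>
      intro s b I S
      rw [PySem.List.enumerate_cons, List.foldl_cons]
      dsimp only
      rw [minF, selIdx, selSteps]
      by_cases hlt : PySem.Str.len v < b
      · -- reset: new best is len v, accumulators restart with this element
        have hmle : minF (PySem.Str.len v) t ≤ PySem.Str.len v := minF_le_init t _
        rw [if_pos hlt, if_pos hlt]
        dsimp only
        rw [if_pos (rfl : PySem.Str.len v = PySem.Str.len v), ih]
        have hnb : ¬ b ≤ minF (PySem.Str.len v) t := by omega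
        rw [if_neg hnb, if_neg hnb]
        by_cases heq : PySem.Str.len v = minF (PySem.Str.len v) t
        · have hle : PySem.Str.len v ≤ minF (PySem.Str.len v) t := le_of_eq heq
          rw [if_pos hle, if_pos hle, if_pos heq]
          by_cases hp : PySem.Str.len v > 0
          · rw [if_pos hp, if_pos (⟨heq, hp⟩ : _ ∧ _)]
            simp
          · rw [if_neg hp, if_neg (fun h => hp h.2)]
            simp
        · have hnle : ¬ PySem.Str.len v ≤ minF (PySem.Str.len v) t := by omega
          rw [if_neg hnle, if_neg hnle, if_neg heq, if_neg (fun h => heq h.1)]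
          simp
      · -- best stays b
        have hmle : minF b t ≤ b := minF_le_init t b
        rw [if_neg hlt, if_neg hlt]
        dsimp only
        by_cases heq : PySem.Str.len v = b
        · rw [if_pos heq, ih]
          by_cases hble : b ≤ minF b t
          · have hm : minF b t = b := le_antisymm hmle hble
            rw [hm]
            rw [if_pos (le_refl b), if_pos (le_refl b), if_pos (le_refl b),
                if_pos (le_refl b), if_pos heq]
            by_cases hp : PySem.Str.len v > 0
            · rw [if_pos hp,
                  if_pos (show PySem.Str.len v = b ∧ PySem.Str.len v > 0 from ⟨heq, hp⟩)]
              simp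
            · rw [if_neg hp,
                  if_neg (show ¬(PySem.Str.len v = b ∧ PySem.Str.len v > 0) from fun h => hp h.2)]
              simp
          · have hne : ¬ PySem.Str.len v = minF b t := by omega
            rw [if_neg hble, if_neg hble, if_neg hble, if_neg hble, if_neg hne,
                if_neg (show ¬(PySem.Str.len v = minF b t ∧ PySem.Str.len v > 0) from
                  fun h => hne h.1)]
            simp
        · rw [if_neg heq, ih]
          have hne : ¬ PySem.Str.len v = minF b t := by omega
          rw [if_neg hne,
              if_neg (show ¬(PySem.Str.len v = minF b t ∧ PySem.Str.len v > 0) from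
                fun h => hne h.1)]
          simp

-- ===== VERDICT (by name: the statement is the Claim_ definition above) =====
theorem next_free_workers_spec : Claim_equal_next_free_workers := by
  intro workers _ hpre
  unfold Spec_next_free_workers next_free_workers next_free_workers_alt
  simp only []
  rw [minFold_eq, aFold_eq, bFold_eq]
  simp
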